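-- pv_equiv track=rewrite | github.com/tyler8812/algoexpert | Recrussion/powerset/sol3.py | helper
-- ===== SOURCE A (Python) =====
-- def helper(idx, array, current_subset, subsets):
--
--     if idx == len(array):
--         new_subsets = subsets.copy()
--         new_subsets.append(current_subset.copy())
--
--     else:
--         new_subsets = helper(idx + 1, array, current_subset.copy(), subsets)
--         current_subset.append(array[idx])
--         new_subsets = helper(idx + 1, array, current_subset.copy(), new_subsets)
--     return new_subsets
-- ===== SOURCE B (Python) =====
-- def helper(idx, array, current_subset, subsets):
--     # Iterative doubling: build all suffix-subset "tails" once, then append them in one pass.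
--     # Return-value equivalence only: unlike A, this does not mutate current_subset.
--     tails = [[]]
--     for j in reversed(range(idx, len(array))):
--         x = array[j]
--         tails = tails + [[x] + t for t in tails]
--     return subsets + [current_subset + t for t in tails]
-- ===== Notes on version B (the rewrite author's own statement) =====
-- stated objective: alternative
-- what changed: Replaces A's branching recursion that copies the growing subsets accumulator at every leaf with a single iterative doubling pass that builds all suffix tails once and appends them to subsets in one concatenation.
import Mathlib
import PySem

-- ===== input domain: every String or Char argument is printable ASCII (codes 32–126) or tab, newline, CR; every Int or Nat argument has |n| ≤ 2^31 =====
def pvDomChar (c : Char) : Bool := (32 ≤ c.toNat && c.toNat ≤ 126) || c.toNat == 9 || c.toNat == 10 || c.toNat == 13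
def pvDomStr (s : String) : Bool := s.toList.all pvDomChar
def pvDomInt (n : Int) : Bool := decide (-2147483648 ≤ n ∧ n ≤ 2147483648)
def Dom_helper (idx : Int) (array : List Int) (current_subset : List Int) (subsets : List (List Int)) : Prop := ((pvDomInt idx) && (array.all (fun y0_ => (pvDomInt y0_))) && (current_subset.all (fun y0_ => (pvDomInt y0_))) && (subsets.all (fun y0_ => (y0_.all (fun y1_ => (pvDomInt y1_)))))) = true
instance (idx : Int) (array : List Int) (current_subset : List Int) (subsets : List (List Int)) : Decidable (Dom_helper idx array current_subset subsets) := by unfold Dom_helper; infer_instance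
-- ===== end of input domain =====

-- B replaces A's copy-heavy double recursion with one iterative doubling pass over the suffix;
-- equivalence is about the RETURN value only (A mutates current_subset in place, B does not).


-- ===== PORT A =====
-- fuel-based totalisation of A's recursion; inside Pre_ the fuel never runs out
def helperFuel : Nat → Int → List Int → List Int → List (List Int) → List (List Int)
  | 0, _, _, _, subsets => subsets
  | n+1, idx, array, current_subset, subsets =>
    if idx = (array.length : Int) then
      subsets ++ [current_subset]
    else
      let new_subsets := helperFuel n (idx + 1) array current_subset subsets
      -- array[idx] (Python indexing, may wrap for negative idx); in-range inside Pre_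
      let x := (PySem.List.pyGet? array idx).getD 0
      helperFuel n (idx + 1) array (current_subset ++ [x]) new_subsets

def helper (idx : Int) (array : List Int) (current_subset : List Int) (subsets : List (List Int)) : List (List Int) :=
  helperFuel (((array.length : Int) - idx).toNat + 1) idx array current_subset subsets

-- ===== PORT B =====
-- tails = [[]]; for j in reversed(range(idx, len(array))): tails = tails + [[array[j]] + t for t in tails]
def tailsOf (idx : Int) (array : List Int) : List (List Int) :=
  (PySem.List.pyRange idx (array.length : Int) 1).reverse.foldl
    (fun tails j => tails ++ tails.map (fun t => ((PySem.List.pyGet? array j).getD 0) :: t)) [[]]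

def helper_alt (idx : Int) (array : List Int) (current_subset : List Int) (subsets : List (List Int)) : List (List Int) :=
  subsets ++ (tailsOf idx array).map (fun t => current_subset ++ t)

-- ===== PRECONDITION & SPEC =====
-- A raises outside this region: RecursionError for idx > len(array), IndexError for idx < -len(array).
def Pre_helper (idx : Int) (array : List Int) (current_subset : List Int) (subsets : List (List Int)) : Prop :=
  -(array.length : Int) ≤ idx ∧ idx ≤ (array.length : Int)
instance (idx : Int) (array : List Int) (current_subset : List Int) (subsets : List (List Int)) : Decidable (Pre_helper idx array current_subset subsets) := by unfold Pre_helper; infer_instance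

def pvWitness_helper : Int × List Int × List Int × List (List Int) := (0, [1, 2], [], [])

def Spec_helper (idx : Int) (array : List Int) (current_subset : List Int) (subsets : List (List Int)) (out : List (List Int)) : Prop := out = helper_alt idx array current_subset subsets
instance (idx : Int) (array : List Int) (current_subset : List Int) (subsets : List (List Int)) (out : List (List Int)) : Decidable (Spec_helper idx array current_subset subsets out) := by unfold Spec_helper; infer_instance

-- ===== CLAIM (what is proved, stated in full; the proofs are below) =====
def Claim_equal_helper : Prop := ∀ (idx : Int) (array : List Int) (current_subset : List Int) (subsets : List (List Int)), Dom_helper idx array current_subset subsets → Pre_helper idx array current_subset subsets → Spec_helper idx array current_subset subsets (helper idx array current_subset subsets)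


-- ===== LEMMAS AND PROOFS =====

-- peel the first index off the reversed range: the tails at idx are the tails at idx+1
-- followed by their copies with array[idx] consed on
theorem tailsOf_step (idx : Int) (array : List Int) (h : idx < (array.length : Int)) :
    tailsOf idx array =
      tailsOf (idx + 1) array ++
        (tailsOf (idx + 1) array).map (fun t => ((PySem.List.pyGet? array idx).getD 0) :: t) := by
  unfold tailsOf
  rw [PySem.List.pyRange_one_cons h]
  simp [List.foldl_append]

theorem tailsOf_base (idx : Int) (array : List Int) (h : idx = (array.length : Int)) :
    tailsOf idx array = [[]] := by
  unfold tailsOf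
  rw [PySem.List.pyRange_one_eq_nil (le_of_eq h.symm)]
  rfl

theorem helperFuel_eq (array : List Int) :
    ∀ (n : Nat) (idx : Int) (cs : List Int) (subsets : List (List Int)),
      idx ≤ (array.length : Int) → (array.length : Int) - idx < n →
      helperFuel n idx array cs subsets =
        subsets ++ (tailsOf idx array).map (fun t => cs ++ t) := by
  intro n
  induction n with
  | zero => intro idx cs subsets h1 h2; omega
  | succ n ih =>
    intro idx cs subsets h1 h2
    by_cases h : idx = (array.length : Int)
    · subst h
      simp [helperFuel, tailsOf_base _ _ rfl]
    · have hlt : idx < (array.length : Int) := lt_of_le_of_ne h1 h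
      have h1' : idx + 1 ≤ (array.length : Int) := by omega
      have h2' : (array.length : Int) - (idx + 1) < n := by omega
      simp only [helperFuel, if_neg h]
      rw [ih (idx + 1) cs subsets h1' h2',
          ih (idx + 1) (cs ++ [(PySem.List.pyGet? array idx).getD 0]) _ h1' h2',
          tailsOf_step idx array hlt]
      simp [List.append_assoc]

-- ===== VERDICT (by name: the statement is the Claim_ definition above) =====
theorem helper_spec : Claim_equal_helper := by
  intro idx array cs subsets _ hpre
  unfold Spec_helper helper helper_alt
  have h1 : idx ≤ (array.length : Int) := hpre.2
  exact helperFuel_eq array _ idx cs subsets h1 (by omega)
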